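-- pv_equiv track=rewrite | github.com/68Duck/micPlot | plot_test.py | calcChanges
-- ===== SOURCE A (Python) =====
-- def calcChanges(parsedArr, mics): #Not in reversed form
--     reversed = reverseScenes(parsedArr, mics)
--     total = 0
--     for row in reversed:
--         r = [x for x in row if x is not None]
--         for i in range(len(r)-1):
--             if r[i] != r[i+1]:
--                 total += 1
--     return total
--
-- def reverseScenes(scenes, mics):
--     reversed = [[None for i in range(len(scenes))] for i in range(mics)]
--     for i in range(len(scenes)):
--         for j in range(len(scenes[i])):
--             reversed[j][i] = scenes[i][j]
--
--     return reversed
-- ===== SOURCE B (Python) =====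
-- _MISSING = object()
--
-- def calcChanges(parsedArr, mics):
--     # Single row-major pass: remember the last non-None value seen per mic.
--     prev = [_MISSING] * mics
--     total = 0
--     for row in parsedArr:
--         for j, val in enumerate(row):
--             if val is not None:
--                 if prev[j] is not _MISSING and prev[j] != val:
--                     total += 1
--                 prev[j] = val
--     return total
-- ===== Notes on version B (the rewrite author's own statement) =====
-- stated objective: faster
-- what changed: B drops the transposed matrix entirely: one row-major pass keeps, per mic, the last non-None value seen (a sentinel-initialised prev list) and bumps a running total whenever a new non-None value differs from it, instead of building the mics x scenes transpose, filtering each transposed row and counting adjacent unequal pairs by index.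
import Mathlib
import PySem

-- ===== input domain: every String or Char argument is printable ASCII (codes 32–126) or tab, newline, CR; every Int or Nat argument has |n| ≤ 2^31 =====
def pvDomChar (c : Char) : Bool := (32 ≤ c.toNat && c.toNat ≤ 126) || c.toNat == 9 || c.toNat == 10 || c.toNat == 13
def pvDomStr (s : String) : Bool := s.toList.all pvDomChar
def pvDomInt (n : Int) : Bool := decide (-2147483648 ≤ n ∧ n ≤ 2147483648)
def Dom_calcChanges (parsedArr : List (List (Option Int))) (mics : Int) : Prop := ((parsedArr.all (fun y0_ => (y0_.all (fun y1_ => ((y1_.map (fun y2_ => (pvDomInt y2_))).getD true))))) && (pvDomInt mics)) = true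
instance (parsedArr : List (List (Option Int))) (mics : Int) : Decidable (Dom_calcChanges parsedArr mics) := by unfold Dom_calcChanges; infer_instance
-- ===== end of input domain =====

-- B replaces A's transpose-then-count-adjacent-pairs with a single row-major pass keeping the
-- last non-None value per mic: it never materialises A's mics x scenes transpose (objective:
-- faster; a timing run measured B ahead on the generated inputs).

-- ===== PORT A =====
-- Python reverseScenes: list writes reversed[j][i] = v become List.set (exact wherever Python
-- does not raise; Pre_ excludes the raising inputs).
def rsInner (row : List (Option Int)) (i : Nat) (rev : List (List (Option Int))) :
    List (List (Option Int)) :=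
  (List.range row.length).foldl
    (fun rv j => rv.set j ((rv.getD j []).set i (row.getD j none))) rev

def reverseScenes (scenes : List (List (Option Int))) (mics : Int) : List (List (Option Int)) :=
  (List.range scenes.length).foldl
    (fun rev i => rsInner (scenes.getD i []) i rev)
    ((PySem.List.pyRange 0 mics 1).map (fun _ => scenes.map (fun _ => (none : Option Int))))

def calcChanges (parsedArr : List (List (Option Int))) (mics : Int) : Int :=
  (reverseScenes parsedArr mics).foldl
    (fun total row =>
      let r := row.filter (fun x => x.isSome)
      (List.range (r.length - 1)).foldl
        (fun t i => if r.getD i none ≠ r.getD (i + 1) none then t + 1 else t)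
        total)
    0

-- ===== PORT B =====
-- loop body of B's inner 'for j, val in enumerate(row)'; prev[j] reads/writes are exact on Pre_
def bStep (st : List (Option Int) × Int) (jv : Int × Option Int) : List (Option Int) × Int :=
  match jv.2 with
  | none => st
  | some v =>
    let t :=
      match st.1.getD jv.1.toNat none with
      | some p => if p ≠ v then st.2 + 1 else st.2
      | none => st.2
    (st.1.set jv.1.toNat (some v), t)

def calcChanges_alt (parsedArr : List (List (Option Int))) (mics : Int) : Int :=
  (parsedArr.foldl
    (fun (st : List (Option Int) × Int) row => (PySem.List.enumerate row 0).foldl bStep st)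
    (List.replicate mics.toNat (none : Option Int), 0)).2

-- ===== PRECONDITION & SPEC =====
-- Pre_ is exactly A's non-raising set: A raises IndexError iff some row is longer than
-- max(mics, 0) (= mics.toNat), because reverseScenes writes reversed[j][i] for every j < len(row).
def Pre_calcChanges (parsedArr : List (List (Option Int))) (mics : Int) : Prop :=
  ∀ row ∈ parsedArr, row.length ≤ mics.toNat
instance (parsedArr : List (List (Option Int))) (mics : Int) :
    Decidable (Pre_calcChanges parsedArr mics) := by unfold Pre_calcChanges; infer_instance

def pvWitness_calcChanges : List (List (Option Int)) × Int := ([[some 1], [some 2], [none]], 1)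

def Spec_calcChanges (parsedArr : List (List (Option Int))) (mics : Int) (out : Int) : Prop :=
  out = calcChanges_alt parsedArr mics
instance (parsedArr : List (List (Option Int))) (mics : Int) (out : Int) :
    Decidable (Spec_calcChanges parsedArr mics out) := by unfold Spec_calcChanges; infer_instance

-- ===== CLAIM (what is proved, stated in full; the proofs are below) =====
def Claim_equal_calcChanges : Prop := ∀ (parsedArr : List (List (Option Int))) (mics : Int), Dom_calcChanges parsedArr mics → Pre_calcChanges parsedArr mics → Spec_calcChanges parsedArr mics (calcChanges parsedArr mics)


-- ===== LEMMAS AND PROOFS =====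

-- contribution of one new entry r against the previous value p of its column
def pvContrib (r p : Option Int) : Int :=
  match r, p with
  | some v, some q => if q ≠ v then 1 else 0
  | _, _ => 0

-- the non-None values of column j, in scene order
def pvCol (scenes : List (List (Option Int))) (j : Nat) : List Int :=
  scenes.filterMap (fun row => row.getD j none)

-- number of adjacent unequal pairs
def pvAdj (l : List Int) : Int :=
  ((List.range (l.length - 1)).map
    (fun i => if l.getD i 0 ≠ l.getD (i + 1) 0 then (1 : Int) else 0)).sum

-- effect of one row of B on the prev list
def pvMerge : List (Option Int) → List (Option Int) → List (Option Int)
  | ps, [] => ps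
  | [], _ :: _ => []
  | p :: ps, r :: rs => (if r.isSome then r else p) :: pvMerge ps rs

-- effect of one row of B on the total
def pvRc : List (Option Int) → List (Option Int) → Int
  | _, [] => 0
  | [], _ :: _ => 0
  | p :: ps, r :: rs => pvContrib r p + pvRc ps rs

-- ---- B side ----

theorem bStep_oob (row : List (Option Int)) :
    ∀ (s : Nat) (prev : List (Option Int)) (total : Int), prev.length ≤ s →
      (PySem.List.enumerate row (s : Int)).foldl bStep (prev, total) = (prev, total) := by
  induction row with
  | nil => intro s prev total _; simp [PySem.List.enumerate]
  | cons r rs ih =>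
    intro s prev total h
    rw [PySem.List.enumerate_cons]
    have hc : (s : Int) + 1 = ((s + 1 : Nat) : Int) := by push_cast; ring
    cases r with
    | none => simp only [List.foldl_cons, bStep, hc]; exact ih (s+1) prev total (by omega)
    | some v =>
      simp only [List.foldl_cons, bStep, Int.toNat_natCast,
        List.getD_eq_default _ _ h, List.set_eq_of_length_le h, hc]
      exact ih (s+1) prev total (by omega)

theorem bInner_spec (row : List (Option Int)) :
    ∀ (pre rest : List (Option Int)) (total : Int),
      (PySem.List.enumerate row ((pre.length : Nat) : Int)).foldl bStep (pre ++ rest, total)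
        = (pre ++ pvMerge rest row, total + pvRc rest row) := by
  induction row with
  | nil =>
    intro pre rest total
    cases rest <;> simp [PySem.List.enumerate, pvMerge, pvRc]
  | cons r rs ih =>
    intro pre rest total
    rw [PySem.List.enumerate_cons]
    cases rest with
    | nil =>
      have hlen : (pre ++ []).length ≤ pre.length := by simp
      cases r with
      | none =>
        simp only [List.foldl_cons, bStep]
        have hc' : ((pre.length : Nat) : Int) + 1 = ((pre.length + 1 : Nat) : Int) := by
          push_cast; ring
        rw [hc', bStep_oob rs (pre.length + 1) _ total (by simp)]
        simp [pvMerge, pvRc]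
      | some v =>
        simp only [List.foldl_cons, bStep, Int.toNat_natCast,
          List.getD_eq_default _ _ hlen, List.set_eq_of_length_le hlen]
        have hc' : ((pre.length : Nat) : Int) + 1 = ((pre.length + 1 : Nat) : Int) := by
          push_cast; ring
        rw [hc', bStep_oob rs (pre.length + 1) _ total (by simp)]
        simp [pvMerge, pvRc]
    | cons q qs =>
      cases r with
      | none =>
        simp only [List.foldl_cons, bStep]
        have h1 : pre ++ q :: qs = (pre ++ [q]) ++ qs := by simp
        have hc' : ((pre.length : Nat) : Int) + 1 = (((pre ++ [q]).length : Nat) : Int) := by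
          simp
        rw [h1, hc', ih (pre ++ [q]) qs total]
        simp [pvMerge, pvRc, pvContrib]
      | some v =>
        simp only [List.foldl_cons, bStep, Int.toNat_natCast]
        have hget : (pre ++ q :: qs).getD pre.length none = q := by
          simp [List.getD]
        have hset : (pre ++ q :: qs).set pre.length (some v) = (pre ++ [some v]) ++ qs := by
          simp
        rw [hget, hset]
        have hc' : ((pre.length : Nat) : Int) + 1 = (((pre ++ [some v]).length : Nat) : Int) := by
          simp
        rw [hc', ih (pre ++ [some v]) qs _]
        simp only [pvMerge, pvRc, Option.isSome_some, if_true, List.append_assoc,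
          List.cons_append, List.nil_append]
        cases q with
        | none => simp [pvContrib]
        | some p =>
          simp only [pvContrib]
          split_ifs <;> simp <;> ring

theorem alt_eq_fold (parsedArr : List (List (Option Int))) (mics : Int) :
    calcChanges_alt parsedArr mics
      = (parsedArr.foldl (fun st row => (pvMerge st.1 row, st.2 + pvRc st.1 row))
          (List.replicate mics.toNat (none : Option Int), 0)).2 := by
  unfold calcChanges_alt
  have hstep : (fun (st : List (Option Int) × Int) (row : List (Option Int)) =>
      (PySem.List.enumerate row 0).foldl bStep st)
      = fun st row => (pvMerge st.1 row, st.2 + pvRc st.1 row) := by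
    funext st row
    have h := bInner_spec row [] st.1 st.2
    simpa using h
  rw [hstep]

theorem pvMerge_getElem? (prev row : List (Option Int)) (k : Nat) :
    (pvMerge prev row)[k]? =
      match prev[k]?, row[k]? with
      | some p, some r => some (if r.isSome then r else p)
      | some p, none => some p
      | none, _ => none := by
  induction prev generalizing row k with
  | nil =>
    cases row with
    | nil => cases k <;> simp [pvMerge]
    | cons r rs => cases k <;> simp [pvMerge]
  | cons p ps ih =>
    cases row with
    | nil =>
      cases k with
      | zero => simp [pvMerge]
      | succ n => simp only [pvMerge, List.getElem?_cons_succ]; cases ps[n]? <;> simp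
    | cons r rs => cases k <;> simp [pvMerge, ih]

theorem pvRc_sum (prev row : List (Option Int)) :
    pvRc prev row
      = ((List.range prev.length).map
          (fun j => pvContrib (row.getD j none) (prev.getD j none))).sum := by
  induction prev generalizing row with
  | nil => cases row <;> rfl
  | cons p ps ih =>
    rw [List.length_cons, List.range_succ_eq_map]
    cases row with
    | nil => simp [pvRc, pvContrib, Function.comp_def]
    | cons r rs =>
      simp only [pvRc, List.map_cons, List.sum_cons, List.map_map]
      rw [ih rs]
      simp [Function.comp_def]

theorem pvCol_append (scenes : List (List (Option Int))) (row : List (Option Int)) (j : Nat) :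
    pvCol (scenes ++ [row]) j = pvCol scenes j ++ (row.getD j none).toList := by
  unfold pvCol
  rw [List.filterMap_append]
  cases h : row.getD j none <;> simp_all [List.getD]

theorem getD_app_left (l l' : List Int) (i : Nat) (h : i < l.length) :
    (l ++ l').getD i 0 = l.getD i 0 := by
  rw [List.getD_eq_getElem _ _ (by simp; omega), List.getD_eq_getElem _ _ h,
      List.getElem_append_left h]

theorem getD_app_v (l : List Int) (v : Int) : (l ++ [v]).getD l.length 0 = v := by
  rw [List.getD_eq_getElem _ _ (by simp), List.getElem_append_right (by omega)]
  simp

theorem pvAdj_snoc (l : List Int) (v : Int) :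
    pvAdj (l ++ [v]) = pvAdj l + pvContrib (some v) l.getLast? := by
  cases l with
  | nil => simp [pvAdj, pvContrib]
  | cons a t =>
    unfold pvAdj
    have hlen : ((a :: t) ++ [v]).length - 1 = t.length + 1 := by simp
    have hlen2 : (a :: t).length - 1 = t.length := by simp
    rw [hlen, hlen2, List.range_succ, List.map_append, List.sum_append]
    congr 1
    · congr 1
      apply List.map_congr_left
      intro i hi
      rw [List.mem_range] at hi
      rw [getD_app_left _ _ _ (by simp; omega), getD_app_left _ _ _ (by simp; omega)]
    · have h1 : t.length < (a :: t).length := by simp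
      have hL : (a :: t).getLast? = some ((a :: t)[t.length]'h1) := by
        rw [List.getLast?_eq_getElem?, hlen2, List.getElem?_eq_getElem h1]
      have hlast : ((a :: t) ++ [v]).getD t.length 0 = (a :: t)[t.length]'h1 := by
        rw [getD_app_left _ _ _ h1, List.getD_eq_getElem _ _ h1]
      have hv : ((a :: t) ++ [v]).getD (t.length + 1) 0 = v := by
        have h2 : t.length + 1 = (a :: t).length := by simp
        rw [h2, getD_app_v]
      simp only [List.map_cons, List.map_nil, List.sum_cons, List.sum_nil, add_zero]
      rw [hlast, hv, hL]
      simp [pvContrib]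

theorem pvAdj_toList (l : List Int) (o : Option Int) :
    pvAdj (l ++ o.toList) = pvAdj l + pvContrib o l.getLast? := by
  cases o with
  | none => simp [pvContrib]
  | some v => exact pvAdj_snoc l v

theorem getLast?_append_toList (l : List Int) (o : Option Int) :
    (l ++ o.toList).getLast? = match o with | some v => some v | none => l.getLast? := by
  cases o <;> simp

theorem Bfold_spec (scenes : List (List (Option Int))) (m : Nat)
    (hP : ∀ row ∈ scenes, row.length ≤ m) :
    scenes.foldl (fun st row => (pvMerge st.1 row, st.2 + pvRc st.1 row))
        (List.replicate m (none : Option Int), 0)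
      = ((List.range m).map (fun j => (pvCol scenes j).getLast?),
         ((List.range m).map (fun j => pvAdj (pvCol scenes j))).sum) := by
  induction scenes using List.reverseRecOn with
  | nil =>
    simp only [List.foldl_nil, Prod.mk.injEq]
    constructor
    · simp [pvCol, List.map_const']
    · simp [pvCol, pvAdj]
  | append_singleton l row ih =>
    have hPl : ∀ r ∈ l, r.length ≤ m := fun r hr => hP r (by simp [hr])
    rw [List.foldl_append, ih hPl, List.foldl_cons, List.foldl_nil]
    simp only [Prod.mk.injEq]
    constructor
    · apply List.ext_getElem?
      intro k
      rw [pvMerge_getElem?]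
      by_cases hk : k < m
      · rw [List.getElem?_map, List.getElem?_map, List.getElem?_range hk]
        cases hr : row[k]? with
        | none =>
          have hgd : row.getD k none = none := by simp [List.getD, hr]
          simp [pvCol_append, getLast?_append_toList, hgd, hr]
        | some r =>
          have hgd : row.getD k none = r := by simp [List.getD, hr]
          cases r with
          | none => simp [pvCol_append, getLast?_append_toList, hgd, hr]
          | some v => simp [pvCol_append, getLast?_append_toList, hgd, hr]
      · have h1 : ((List.range m).map (fun j => (pvCol l j).getLast?))[k]? = none := by
          simp; omega
        have h2 : ((List.range m).map (fun j => (pvCol (l ++ [row]) j).getLast?))[k]? = none := by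
          simp; omega
        rw [h1, h2]
    · rw [pvRc_sum]
      have hlen : ((List.range m).map (fun j => (pvCol l j).getLast?)).length = m := by simp
      rw [hlen]
      have hsum : (List.range m).map (fun j => pvAdj (pvCol (l ++ [row]) j))
          = (List.range m).map (fun j => pvAdj (pvCol l j)
              + pvContrib (row.getD j none) ((pvCol l j).getLast?)) := by
        apply List.map_congr_left
        intro j _
        rw [pvCol_append, pvAdj_toList]
      rw [hsum, PySem.List.sum_map_add_int]
      have hc : (List.range m).map
            (fun j => pvContrib (row.getD j none)
              (((List.range m).map (fun j => (pvCol l j).getLast?)).getD j none))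
          = (List.range m).map
            (fun j => pvContrib (row.getD j none) ((pvCol l j).getLast?)) := by
        apply List.map_congr_left
        intro j hj
        rw [List.mem_range] at hj
        rw [List.getD_eq_getElem ((List.range m).map fun j => (pvCol l j).getLast?) none
              (by simpa using hj),
            List.getElem_map, List.getElem_range]
      rw [hc]

theorem B_eq (parsedArr : List (List (Option Int))) (mics : Int)
    (hP : Pre_calcChanges parsedArr mics) :
    calcChanges_alt parsedArr mics
      = ((List.range mics.toNat).map (fun j => pvAdj (pvCol parsedArr j))).sum := by
  rw [alt_eq_fold, Bfold_spec parsedArr mics.toNat hP]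

-- ---- A side ----

theorem rsFold_length (row : List (Option Int)) (i : Nat) :
    ∀ (L : Nat) (rev : List (List (Option Int))),
      ((List.range L).foldl
         (fun rv j => rv.set j ((rv.getD j []).set i (row.getD j none))) rev).length
        = rev.length := by
  intro L
  induction L with
  | zero => intro rev; simp
  | succ n ih =>
    intro rev
    rw [List.range_succ, List.foldl_append, List.foldl_cons, List.foldl_nil,
        List.length_set, ih]

theorem rsFold_getElem? (row : List (Option Int)) (i : Nat) :
    ∀ (L : Nat) (rev : List (List (Option Int))) (j : Nat),
      ((List.range L).foldl
         (fun rv j => rv.set j ((rv.getD j []).set i (row.getD j none))) rev)[j]?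
        = if j < L then (rev[j]?).map (fun r => r.set i (row.getD j none)) else rev[j]? := by
  intro L
  induction L with
  | zero => intro rev j; simp
  | succ n ih =>
    intro rev j
    rw [List.range_succ, List.foldl_append, List.foldl_cons, List.foldl_nil,
        List.getElem?_set]
    by_cases hjn : n = j
    · subst hjn
      rw [if_pos rfl, rsFold_length, List.getD_eq_getElem?_getD, ih,
          if_neg (lt_irrefl n), if_pos (Nat.lt_succ_self n)]
      cases hrev : rev[n]? with
      | none =>
        have hle : rev.length ≤ n := List.getElem?_eq_none_iff.mp hrev
        rw [if_neg (by omega)]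
        rfl
      | some r =>
        have hlt : n < rev.length := by
          by_contra h
          rw [List.getElem?_eq_none (by omega)] at hrev
          simp at hrev
        rw [if_pos hlt]
        rfl
    · rw [if_neg hjn, ih]
      by_cases hj : j < n
      · rw [if_pos hj, if_pos (by omega)]
      · rw [if_neg hj, if_neg (by omega)]

theorem rsInner_getElem? (row : List (Option Int)) (i : Nat) (rev : List (List (Option Int)))
    (j : Nat) :
    (rsInner row i rev)[j]? =
      if j < row.length then (rev[j]?).map (fun r => r.set i (row.getD j none)) else rev[j]? := by
  unfold rsInner
  rw [rsFold_getElem?]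

theorem map_range_getD {α β : Type} (scenes : List α) (d : α) (f : α → β) :
    (List.range scenes.length).map (fun i => f (scenes.getD i d)) = scenes.map f := by
  induction scenes with
  | nil => rfl
  | cons a t ih =>
    rw [List.length_cons, List.range_succ_eq_map]
    simp only [List.map_cons, List.map_map]
    simp only [Function.comp_def, List.getD_cons_succ, List.getD_cons_zero]
    rw [ih]

theorem rs_aux (scenes : List (List (Option Int))) (m : Nat)
    (hP : ∀ row ∈ scenes, row.length ≤ m) :
    ∀ K, K ≤ scenes.length →
      (List.range K).foldl (fun rev i => rsInner (scenes.getD i []) i rev)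
          ((List.range m).map (fun _ => scenes.map (fun _ => (none : Option Int))))
        = (List.range m).map (fun j => (List.range scenes.length).map
            (fun i2 => if i2 < K then (scenes.getD i2 []).getD j none else (none : Option Int))) := by
  intro K
  induction K with
  | zero =>
    intro _
    simp [List.map_const']
  | succ n ih =>
    intro hK
    have hn : n < scenes.length := by omega
    rw [List.range_succ, List.foldl_append, List.foldl_cons, List.foldl_nil, ih (by omega)]
    have hmem : scenes.getD n [] ∈ scenes := by
      rw [List.getD_eq_getElem _ _ hn]
      exact List.getElem_mem hn
    have hrowlen : (scenes.getD n []).length ≤ m := hP _ hmem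
    apply List.ext_getElem?
    intro j
    rw [rsInner_getElem?]
    by_cases hj : j < m
    · have hprev : ((List.range m).map (fun j => (List.range scenes.length).map
            (fun i2 => if i2 < n then (scenes.getD i2 []).getD j none
                       else (none : Option Int))))[j]?
          = some ((List.range scenes.length).map
              (fun i2 => if i2 < n then (scenes.getD i2 []).getD j none
                         else (none : Option Int))) := by
        rw [List.getElem?_map, List.getElem?_range hj]
        rfl
      have hgoal : ((List.range m).map (fun j => (List.range scenes.length).map
            (fun i2 => if i2 < n + 1 then (scenes.getD i2 []).getD j none
                       else (none : Option Int))))[j]?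
          = some ((List.range scenes.length).map
              (fun i2 => if i2 < n + 1 then (scenes.getD i2 []).getD j none
                         else (none : Option Int))) := by
        rw [List.getElem?_map, List.getElem?_range hj]
        rfl
      rw [hprev, hgoal]
      by_cases hjr : j < (scenes.getD n []).length
      · rw [if_pos hjr, Option.map_some]
        congr 1
        apply List.ext_getElem (by simp)
        intro i2 h1 h2
        rw [List.getElem_set]
        simp only [List.getElem_map,
          List.getElem_range]
        by_cases hin : n = i2
        · subst hin
          rw [if_pos rfl, if_pos (by omega)]
        · rw [if_neg hin]
          by_cases h3 : i2 < n
          · rw [if_pos h3, if_pos (by omega)]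
          · rw [if_neg h3, if_neg (by omega)]
      · rw [if_neg hjr]
        congr 1
        apply List.ext_getElem (by simp)
        intro i2 h1 h2
        simp only [List.getElem_map, List.getElem_range]
        by_cases hin : i2 = n
        · subst hin
          rw [if_neg (by omega), if_pos (by omega),
              List.getD_eq_default _ _ (by omega)]
        · by_cases h3 : i2 < n
          · rw [if_pos h3, if_pos (by omega)]
          · rw [if_neg h3, if_neg (by omega)]
    · have hprev : ((List.range m).map (fun j => (List.range scenes.length).map
            (fun i2 => if i2 < n then (scenes.getD i2 []).getD j none
                       else (none : Option Int))))[j]? = none := by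
        apply List.getElem?_eq_none
        simp
        omega
      have hgoal : ((List.range m).map (fun j => (List.range scenes.length).map
            (fun i2 => if i2 < n + 1 then (scenes.getD i2 []).getD j none
                       else (none : Option Int))))[j]? = none := by
        apply List.getElem?_eq_none
        simp
        omega
      rw [hprev, hgoal, if_neg (by omega)]

theorem rs_spec (scenes : List (List (Option Int))) (mics : Int)
    (hP : Pre_calcChanges scenes mics) :
    reverseScenes scenes mics
      = (List.range mics.toNat).map (fun j => scenes.map (fun row => row.getD j none)) := by
  unfold reverseScenes
  have hinit : ((PySem.List.pyRange 0 mics 1).map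
        (fun _ => scenes.map (fun _ => (none : Option Int))))
      = (List.range mics.toNat).map (fun _ => scenes.map (fun _ => (none : Option Int))) := by
    rw [PySem.List.pyRange_one, List.map_map]
    simp [Function.comp_def]
  rw [hinit, rs_aux scenes mics.toNat hP scenes.length (le_refl _)]
  apply List.map_congr_left
  intro j _
  have hin : (List.range scenes.length).map
        (fun i2 => if i2 < scenes.length then (scenes.getD i2 []).getD j none
                   else (none : Option Int))
      = (List.range scenes.length).map (fun i2 => (scenes.getD i2 []).getD j none) := by
    apply List.map_congr_left
    intro i2 hi2
    rw [List.mem_range] at hi2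
    rw [if_pos hi2]
  rw [hin, map_range_getD scenes [] (fun row => row.getD j none)]

theorem filter_isSome_eq (l : List (Option Int)) :
    l.filter (fun x => x.isSome) = (l.filterMap id).map some := by
  induction l with
  | nil => rfl
  | cons a t ih => cases a <;> simp [ih]

theorem fold_adj (v : List Int) (t0 : Int) :
    (List.range ((v.map some).length - 1)).foldl
        (fun t i => if (v.map some).getD i none ≠ (v.map some).getD (i + 1) none then t + 1 else t)
        t0
      = t0 + pvAdj v := by
  have hstep : (fun (t : Int) (i : Nat) =>
      if (v.map some).getD i none ≠ (v.map some).getD (i + 1) none then t + 1 else t)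
    = fun t i => t + (if (v.map some).getD i none ≠ (v.map some).getD (i + 1) none then (1:Int) else 0) := by
    funext t i; split_ifs <;> simp
  rw [hstep, PySem.List.foldl_add]
  congr 1
  unfold pvAdj
  rw [List.length_map]
  congr 1
  apply List.map_congr_left
  intro i hi
  rw [List.mem_range] at hi
  have h1 : i < v.length := by omega
  have h2 : i + 1 < v.length := by omega
  rw [List.getD_eq_getElem _ _ (by simpa using h1), List.getD_eq_getElem _ _ (by simpa using h2),
      List.getElem_map, List.getElem_map,
      List.getD_eq_getElem _ _ h1, List.getD_eq_getElem _ _ h2]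
  simp

theorem A_eq (parsedArr : List (List (Option Int))) (mics : Int)
    (hP : Pre_calcChanges parsedArr mics) :
    calcChanges parsedArr mics
      = ((List.range mics.toNat).map (fun j => pvAdj (pvCol parsedArr j))).sum := by
  unfold calcChanges
  rw [rs_spec parsedArr mics hP, List.foldl_map]
  have hstep : (fun (total : Int) (j : Nat) =>
      (fun total row =>
        let r := List.filter (fun x => x.isSome) row
        (List.range (r.length - 1)).foldl
          (fun t i => if r.getD i none ≠ r.getD (i + 1) none then t + 1 else t) total)
        total (parsedArr.map (fun row => row.getD j none)))
      = fun total j => total + pvAdj (pvCol parsedArr j) := by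
    funext t j
    simp only [filter_isSome_eq, List.filterMap_map]
    have hid : (id ∘ fun (row : List (Option Int)) => row.getD j none)
        = fun row => row.getD j none := by
      funext row
      rfl
    rw [hid]
    exact fold_adj _ t
  rw [hstep, PySem.List.foldl_add]
  simp [Function.comp_def]

-- ===== VERDICT (by name: the statement is the Claim_ definition above) =====
theorem calcChanges_spec : Claim_equal_calcChanges := by
  intro parsedArr mics _ hPre
  unfold Spec_calcChanges
  rw [A_eq parsedArr mics hPre, B_eq parsedArr mics hPre]
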